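-- pv_equiv track=rewrite | github.com/m1sterzer0/DaveProgrammingCompetitions | atcoder/python/abc210_219/abc214_G.py | solvering2
-- ===== SOURCE A (Python) =====
-- MOD = 1_000_000_007
--
-- def solvering2(cnt,fact,factinv) :
--     def binom(n,r) : return fact[n] * factinv[r] % MOD * factinv[n-r] % MOD
--     ans = [0] * (cnt+1)
--     ans[cnt] = 1 if cnt == 1 else 2
--     for first in range(cnt) :
--         for other in range(cnt-first) :
--             ans[cnt-other-1] += binom(cnt-first+other, 2*other+1)
--             ans[cnt-other-1] += first * binom(cnt-first+other-1, 2*other)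
--             ans[cnt-other-1] %= MOD
--     return ans
-- ===== SOURCE B (Python) =====
-- MOD = 1_000_000_007
--
-- def solvering2(cnt, fact, factinv):
--     # Convolution form: factor the row-constant inverse-factorial entries out of
--     # the binomial sums; each cell is two dot products of a slice of fact with a
--     # prefix of factinv, combined and reduced mod MOD once (no binom helper).
--     out = []
--     for j in range(cnt):
--         r = 2 * (cnt - j) - 1
--         fi = factinv[:j + 1]
--         s1 = sum(a * b for a, b in zip(fact[r:r + j + 1], fi))
--         s0 = sum((j - i) * a * b for i, (a, b) in enumerate(zip(fact[r - 1:r + j], fi)))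
--         out.append((factinv[r] * s1 + factinv[r - 1] * s0) % MOD)
--     out.append(1 if cnt == 1 else 2)
--     return out
-- ===== Notes on version B (the rewrite author's own statement) =====
-- stated objective: alternative
-- what changed: B replaces the binomial-sum accumulation with a convolution form: it factors the row-constant inverse-factorial entries out of each cell's sum by modular congruence, computing every cell as two dot products of a fact-slice with a factinv-prefix, with a single mod per cell and no binom helper.
import Mathlib
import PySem

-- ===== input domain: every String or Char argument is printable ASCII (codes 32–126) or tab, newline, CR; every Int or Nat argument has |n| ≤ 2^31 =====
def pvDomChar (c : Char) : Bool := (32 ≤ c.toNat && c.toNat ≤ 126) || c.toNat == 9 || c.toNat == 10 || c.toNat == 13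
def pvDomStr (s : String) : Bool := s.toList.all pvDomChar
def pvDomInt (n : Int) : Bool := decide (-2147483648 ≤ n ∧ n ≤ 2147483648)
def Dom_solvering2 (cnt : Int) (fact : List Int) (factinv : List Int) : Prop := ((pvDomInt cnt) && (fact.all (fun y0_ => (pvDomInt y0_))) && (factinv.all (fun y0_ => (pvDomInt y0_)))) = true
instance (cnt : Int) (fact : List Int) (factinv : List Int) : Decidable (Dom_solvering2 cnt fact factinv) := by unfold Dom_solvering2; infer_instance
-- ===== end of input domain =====

-- B replaces A's binomial-sum accumulation by a convolution form: the row-constant inverse-factorial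
-- entries are factored out of each cell (a mod-MOD congruence, valid for arbitrary table values), so
-- each cell is two dot products of a fact-slice with a factinv-prefix, one mod per cell, no binom helper.

-- ===== PORT A =====
def pvMOD : Int := 1000000007

def pvBinomA (fact factinv : List Int) (n r : Int) : Int :=
  PySem.Int.mod (PySem.Int.mod (PySem.List.pyGetD fact n 0 * PySem.List.pyGetD factinv r 0) pvMOD
    * PySem.List.pyGetD factinv (n - r) 0) pvMOD

def solvering2 (cnt : Int) (fact : List Int) (factinv : List Int) : List Int :=
  let ans := List.replicate (cnt + 1).toNat 0
  let ans := PySem.List.pySetD ans cnt (if cnt == 1 then 1 else 2)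
  (PySem.List.pyRange 0 cnt 1).foldl (fun ans first =>
    (PySem.List.pyRange 0 (cnt - first) 1).foldl (fun ans other =>
      let ans := PySem.List.pySetD ans (cnt - other - 1)
        (PySem.List.pyGetD ans (cnt - other - 1) 0 + pvBinomA fact factinv (cnt - first + other) (2 * other + 1))
      let ans := PySem.List.pySetD ans (cnt - other - 1)
        (PySem.List.pyGetD ans (cnt - other - 1) 0 + first * pvBinomA fact factinv (cnt - first + other - 1) (2 * other))
      PySem.List.pySetD ans (cnt - other - 1)
        (PySem.Int.mod (PySem.List.pyGetD ans (cnt - other - 1) 0) pvMOD)) ans) ans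

-- ===== PORT B =====
-- one cell of Source B's loop body (r, the two slice dot-products, single mod)
def pvCellB (cnt : Int) (fact factinv : List Int) (j : Int) : Int :=
  let r := 2 * (cnt - j) - 1
  let fi := PySem.List.slice factinv none (some (j + 1))
  let s1 := (((PySem.List.slice fact (some r) (some (r + j + 1))).zip fi).map (fun p => p.1 * p.2)).sum
  let s0 := ((PySem.List.enumerate ((PySem.List.slice fact (some (r - 1)) (some (r + j))).zip fi) 0).map
      (fun p => (j - p.1) * p.2.1 * p.2.2)).sum
  PySem.Int.mod (PySem.List.pyGetD factinv r 0 * s1 + PySem.List.pyGetD factinv (r - 1) 0 * s0) pvMOD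

def solvering2_alt (cnt : Int) (fact : List Int) (factinv : List Int) : List Int :=
  (PySem.List.pyRange 0 cnt 1).map (pvCellB cnt fact factinv) ++ [if cnt == 1 then 1 else 2]

-- ===== PRECONDITION & SPEC =====
-- Pre_ excludes exactly the inputs on which Python A raises (IndexError): negative cnt
-- (ans = [] and ans[cnt] fails), or fact/factinv shorter than 2*cnt (binom index out of range).
def Pre_solvering2 (cnt : Int) (fact : List Int) (factinv : List Int) : Prop :=
  0 ≤ cnt ∧ 2 * cnt ≤ (fact.length : Int) ∧ 2 * cnt ≤ (factinv.length : Int)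
instance (cnt : Int) (fact : List Int) (factinv : List Int) : Decidable (Pre_solvering2 cnt fact factinv) := by unfold Pre_solvering2; infer_instance

def pvWitness_solvering2 : Int × List Int × List Int := (2, [1, 1, 2, 6], [1, 1, 1, 1])

def Spec_solvering2 (cnt : Int) (fact : List Int) (factinv : List Int) (out : List Int) : Prop := out = solvering2_alt cnt fact factinv
instance (cnt : Int) (fact : List Int) (factinv : List Int) (out : List Int) : Decidable (Spec_solvering2 cnt fact factinv out) := by unfold Spec_solvering2; infer_instance

-- ===== CLAIM (what is proved, stated in full; the proofs are below) =====
def Claim_equal_solvering2 : Prop := ∀ (cnt : Int) (fact : List Int) (factinv : List Int), Dom_solvering2 cnt fact factinv → Pre_solvering2 cnt fact factinv → Spec_solvering2 cnt fact factinv (solvering2 cnt fact factinv)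

-- ===== LEMMAS AND PROOFS =====

-- the combined contribution of outer index f to the cell whose 'other' is (N:Int)-1-j
def pvTerm (N : Nat) (fact factinv : List Int) (f other : Int) : Int :=
  pvBinomA fact factinv ((N : Int) - f + other) (2 * other + 1)
    + f * pvBinomA fact factinv ((N : Int) - f + other - 1) (2 * other)

def pvStep (N : Nat) (fact factinv : List Int) (j : Nat) (v : Int) (f : Nat) : Int :=
  PySem.Int.mod (v + pvTerm N fact factinv (f : Int) ((N : Int) - 1 - (j : Int))) pvMOD

-- value of cell j after the first m outer iterations of A
def pvPC (N : Nat) (fact factinv : List Int) (j m : Nat) : Int :=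
  (List.range (min m (j + 1))).foldl (pvStep N fact factinv j) 0

def pvLast (N : Nat) : Int := if (N : Int) == 1 then 1 else 2

def pvState (N : Nat) (fact factinv : List Int) (m : Nat) : List Int :=
  (List.range N).map (fun j => pvPC N fact factinv j m) ++ [pvLast N]

-- A's inner-loop body, with cnt = (N:Int) and the current value of 'first'
def pvInner (N : Nat) (fact factinv : List Int) (first : Int) (ans : List Int) (other : Int) : List Int :=
  let ans := PySem.List.pySetD ans ((N : Int) - other - 1)
    (PySem.List.pyGetD ans ((N : Int) - other - 1) 0 + pvBinomA fact factinv ((N : Int) - first + other) (2 * other + 1))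
  let ans := PySem.List.pySetD ans ((N : Int) - other - 1)
    (PySem.List.pyGetD ans ((N : Int) - other - 1) 0 + first * pvBinomA fact factinv ((N : Int) - first + other - 1) (2 * other))
  PySem.List.pySetD ans ((N : Int) - other - 1)
    (PySem.Int.mod (PySem.List.pyGetD ans ((N : Int) - other - 1) 0) pvMOD)

theorem pv_getD_cell (N j : Nat) (g : Nat → Int) (c : Int) (hj : j < N) :
    ((List.range N).map g ++ [c]).getD j 0 = g j := by
  simp [List.getD, List.getElem?_append_left, hj]

theorem pv_set_map_range {α : Type} (N j : Nat) (g : Nat → α) (v : α) :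
    ((List.range N).map g).set j v = (List.range N).map (fun i => if i = j then v else g i) := by
  apply List.ext_getElem (by simp)
  intro i hi _
  simp only [List.getElem_set, List.getElem_map, List.getElem_range]
  by_cases h : i = j
  · simp [h]
  · simp [h, Ne.symm h]

theorem pv_set_cell (N j : Nat) (g : Nat → Int) (c v : Int) (hj : j < N) :
    ((List.range N).map g ++ [c]).set j v
      = (List.range N).map (fun i => if i = j then v else g i) ++ [c] := by
  rw [List.set_append]
  simp only [List.length_map, List.length_range, hj, if_pos, pv_set_map_range N j g v]

theorem pv_pc_succ (N : Nat) (fact factinv : List Int) (j m : Nat) (h : m ≤ j) :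
    pvPC N fact factinv j (m + 1)
      = PySem.Int.mod (pvPC N fact factinv j m + pvTerm N fact factinv (m : Int) ((N : Int) - 1 - (j : Int))) pvMOD := by
  unfold pvPC
  rw [Nat.min_eq_left (by omega), Nat.min_eq_left (by omega), List.range_succ, List.foldl_append]
  simp [pvStep]

theorem pv_pc_stable (N : Nat) (fact factinv : List Int) (j m : Nat) (h : j < m) :
    pvPC N fact factinv j (m + 1) = pvPC N fact factinv j m := by
  unfold pvPC
  rw [Nat.min_eq_right (by omega), Nat.min_eq_right (by omega)]

theorem pv_inner_step (N m M : Nat) (fact factinv : List Int) (hm : m < N) (hM : M < N - m)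
    (g : Nat → Int) :
    pvInner N fact factinv (m : Int) ((List.range N).map g ++ [pvLast N]) (M : Int)
      = (List.range N).map (fun i => if i = N - 1 - M
          then PySem.Int.mod (g (N - 1 - M) + pvTerm N fact factinv (m : Int) ((N : Int) - 1 - ((N - 1 - M : Nat) : Int))) pvMOD
          else g i) ++ [pvLast N] := by
  have hj : N - 1 - M < N := by omega
  have hc : (N : Int) - (M : Int) - 1 = ((N - 1 - M : Nat) : Int) := by omega
  have hc2 : (N : Int) - 1 - ((N - 1 - M : Nat) : Int) = (M : Int) := by omega
  unfold pvInner
  rw [hc]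
  simp only [PySem.List.pySetD_natCast, PySem.List.pyGetD_natCast]
  rw [pv_getD_cell N _ g _ hj, pv_set_cell N _ g _ _ hj,
      pv_getD_cell N _ _ _ hj, pv_set_cell N _ _ _ _ hj,
      pv_getD_cell N _ _ _ hj, pv_set_cell N _ _ _ _ hj]
  refine congrArg (fun l => l ++ [pvLast N]) ?_
  apply List.map_congr_left
  intro i hi
  by_cases h : i = N - 1 - M
  · simp [h, hc2, pvTerm, add_assoc]
  · simp [h]

theorem pv_inner_fold (N m : Nat) (fact factinv : List Int) (hm : m < N) :
    ∀ (M : Nat), M ≤ N - m → ∀ (g : Nat → Int),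
    ((List.range M).map (Nat.cast : Nat → Int)).foldl (pvInner N fact factinv (m : Int))
        ((List.range N).map g ++ [pvLast N])
      = (List.range N).map (fun j => if N - M ≤ j
          then PySem.Int.mod (g j + pvTerm N fact factinv (m : Int) ((N : Int) - 1 - (j : Int))) pvMOD
          else g j) ++ [pvLast N] := by
  intro M
  induction M with
  | zero =>
    intro _ g
    simp only [List.range_zero, List.map_nil, List.foldl_nil]
    refine congrArg (fun l => l ++ [pvLast N]) (List.map_congr_left ?_)
    intro i hi
    rw [if_neg (by simp at hi; omega)]
  | succ M ih =>
    intro hM g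
    rw [List.range_succ, List.map_append, List.foldl_append]
    rw [ih (by omega) g]
    simp only [List.map_cons, List.map_nil, List.foldl_cons, List.foldl_nil]
    rw [pv_inner_step N m M fact factinv hm (by omega)]
    refine congrArg (fun l => l ++ [pvLast N]) (List.map_congr_left ?_)
    intro i hi
    simp only [List.mem_range] at hi
    by_cases h : i = N - 1 - M
    · subst h
      rw [if_pos rfl, if_neg (by omega), if_pos (by omega)]
    · rw [if_neg h]
      by_cases h2 : N - M ≤ i
      · rw [if_pos h2, if_pos (by omega)]
      · rw [if_neg h2, if_neg (by omega)]

theorem pv_outer_step (N m : Nat) (fact factinv : List Int) (hm : m < N) :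
    ((List.range (N - m)).map (Nat.cast : Nat → Int)).foldl (pvInner N fact factinv (m : Int))
        (pvState N fact factinv m)
      = pvState N fact factinv (m + 1) := by
  unfold pvState
  rw [pv_inner_fold N m fact factinv hm (N - m) le_rfl]
  refine congrArg (fun l => l ++ [pvLast N]) (List.map_congr_left ?_)
  intro j hj
  simp only [List.mem_range] at hj
  by_cases h : m ≤ j
  · rw [if_pos (by omega), pv_pc_succ N fact factinv j m h]
  · rw [if_neg (by omega), pv_pc_stable N fact factinv j m (by omega)]

theorem pv_outer_fold (N : Nat) (fact factinv : List Int) :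
    ∀ (n : Nat), n ≤ N →
    ((List.range n).map (Nat.cast : Nat → Int)).foldl
        (fun ans first => (PySem.List.pyRange 0 ((N : Int) - first) 1).foldl (pvInner N fact factinv first) ans)
        (pvState N fact factinv 0)
      = pvState N fact factinv n := by
  intro n
  induction n with
  | zero => intro _; rfl
  | succ n ih =>
    intro hn
    rw [List.range_succ, List.map_append, List.foldl_append, ih (by omega)]
    simp only [List.map_cons, List.map_nil, List.foldl_cons, List.foldl_nil]
    rw [show (N : Int) - (n : Int) = ((N - n : Nat) : Int) by omega,
        PySem.List.pyRange_zero_natCast]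
    exact pv_outer_step N n fact factinv (by omega)

theorem pv_foldl_mod (ts : List Int) (v : Int) (h : ts ≠ []) :
    ts.foldl (fun v t => PySem.Int.mod (v + t) pvMOD) v = PySem.Int.mod (v + ts.sum) pvMOD := by
  induction ts generalizing v with
  | nil => simp at h
  | cons t ts ih =>
    by_cases hts : ts = []
    · subst hts; simp
    rw [List.foldl_cons, ih _ hts, List.sum_cons]
    simp only [PySem.Int.mod_eq_emod_of_pos (show (0:Int) < pvMOD by norm_num [pvMOD])]
    rw [Int.emod_add_emod, Int.add_assoc]

theorem pv_init_state (N : Nat) (fact factinv : List Int) :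
    PySem.List.pySetD (List.replicate (((N : Int) + 1).toNat) 0) (N : Int) (if (N : Int) == 1 then 1 else 2)
      = pvState N fact factinv 0 := by
  rw [show ((N : Int) + 1).toNat = N + 1 by omega]
  rw [PySem.List.pySetD_natCast]
  rw [List.replicate_succ', List.set_append]
  simp only [List.length_replicate, lt_irrefl, if_false, Nat.sub_self, List.set_cons_zero]
  unfold pvState pvLast pvPC
  rw [show (List.range N).map (fun j => (List.range (min 0 (j+1))).foldl (pvStep N fact factinv j) 0)
        = (List.range N).map (Function.const Nat (0 : Int)) from List.map_congr_left (by intro i _; simp)]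
  rw [List.map_const, List.length_range]

theorem pv_A_eq_state (N : Nat) (fact factinv : List Int) :
    solvering2 (N : Int) fact factinv = pvState N fact factinv N := by
  unfold solvering2
  dsimp only
  rw [PySem.List.pyRange_zero_natCast, pv_init_state N fact factinv]
  exact pv_outer_fold N fact factinv N le_rfl

-- list sum over a range is the Finset sum (definitional)
theorem pv_sum_range_list (n : Nat) (f : Nat → Int) :
    ((List.range n).map f).sum = ∑ i ∈ Finset.range n, f i := rfl

-- A's cell j, closed form: mod of the sum of its j+1 terms
theorem pv_pc_closed (N : Nat) (fact factinv : List Int) (j : Nat) (hj : j < N) :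
    pvPC N fact factinv j N
      = PySem.Int.mod (∑ f ∈ Finset.range (j + 1),
          pvTerm N fact factinv (f : Int) ((N : Int) - 1 - (j : Int))) pvMOD := by
  unfold pvPC
  rw [Nat.min_eq_right (by omega)]
  rw [show (List.range (j+1)).foldl (pvStep N fact factinv j) 0
        = ((List.range (j+1)).map (fun f : Nat => pvTerm N fact factinv (f : Int) ((N : Int) - 1 - (j : Int)))).foldl
            (fun v t => PySem.Int.mod (v + t) pvMOD) 0 from by rw [List.foldl_map]; rfl]
  rw [pv_foldl_mod _ _ (by simp), zero_add, pv_sum_range_list]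

theorem pv_getD_drop_take (l : List Int) (a m i : Nat) (hi : i < m) (h : a + i < l.length) :
    ((l.drop a).take m).getD i 0 = l.getD (a + i) 0 := by
  have h1 : i < ((l.drop a).take m).length := by simp; omega
  rw [List.getD_eq_getElem _ _ h1, List.getD_eq_getElem _ _ h]
  simp [List.getElem_take, List.getElem_drop]

theorem pv_zip_map_sum (l1 l2 : List Int) (n : Nat) (h1 : l1.length = n) (h2 : l2.length = n)
    (g : Int → Int → Int) :
    (((l1.zip l2).map (fun p => g p.1 p.2)).sum)
      = ∑ i ∈ Finset.range n, g (l1.getD i 0) (l2.getD i 0) := by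
  rw [← pv_sum_range_list]
  refine congrArg List.sum ?_
  apply List.ext_getElem (by simp [h1, h2])
  intro i hi _
  simp only [List.length_map, List.length_zip, h1, h2, Nat.min_self] at hi
  simp [List.getElem_zip, h1 ▸ hi, h2 ▸ hi]

theorem pv_enum_zip_map_sum (l1 l2 : List Int) (n : Nat) (h1 : l1.length = n) (h2 : l2.length = n)
    (g : Int → Int → Int → Int) :
    ((PySem.List.enumerate (l1.zip l2) 0).map (fun p => g p.1 p.2.1 p.2.2)).sum
      = ∑ i ∈ Finset.range n, g (i : Int) (l1.getD i 0) (l2.getD i 0) := by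
  rw [← pv_sum_range_list]
  refine congrArg List.sum ?_
  apply List.ext_getElem (by simp [PySem.List.length_enumerate, h1, h2])
  intro i hi _
  simp only [List.length_map, PySem.List.length_enumerate, List.length_zip, h1, h2, Nat.min_self] at hi
  have hz : i < (l1.zip l2).length := by simp [h1, h2]; omega
  simp [PySem.List.getElem_enumerate, List.getElem_zip, h1 ▸ hi, h2 ▸ hi]

-- core modular fact: A's reduced binomial product is congruent to the raw triple product
theorem pv_binom_modeq (x c y : Int) :
    PySem.Int.mod (PySem.Int.mod (x * c) pvMOD * y) pvMOD ≡ c * (x * y) [ZMOD pvMOD] := by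
  have hM : (0:Int) < pvMOD := by norm_num [pvMOD]
  rw [PySem.Int.mod_eq_emod_of_pos hM, PySem.Int.mod_eq_emod_of_pos hM]
  have base : ∀ a : Int, a % pvMOD ≡ a [ZMOD pvMOD] := fun a => Int.emod_emod_of_dvd a dvd_rfl
  calc x * c % pvMOD * y % pvMOD
      ≡ x * c % pvMOD * y [ZMOD pvMOD] := base _
    _ ≡ x * c * y [ZMOD pvMOD] := (base _).mul_right y
    _ = c * (x * y) := by ring

-- B's cell j equals A's cell j (the convolution is a mod-MOD congruence plus reindexing i = j - f)
theorem pv_B_cell (N j : Nat) (fact factinv : List Int) (hj : j < N)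
    (hf : 2 * N ≤ fact.length) (hfi : 2 * N ≤ factinv.length) :
    pvCellB (N : Int) fact factinv (j : Int)
      = PySem.Int.mod (∑ f ∈ Finset.range (j + 1),
          pvTerm N fact factinv (f : Int) ((N : Int) - 1 - (j : Int))) pvMOD := by
  have hM : (0:Int) < pvMOD := by norm_num [pvMOD]
  -- the Nat value of r
  set R : Nat := 2 * (N - j) - 1 with hR
  have hR1 : 1 ≤ R := by omega
  have hRv : (2 : Int) * ((N : Int) - (j : Int)) - 1 = (R : Int) := by omega
  unfold pvCellB
  simp only
  rw [hRv,
      show (R : Int) + (j : Int) + 1 = ((R + j + 1 : Nat) : Int) by push_cast; ring,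
      show (R : Int) - 1 = ((R - 1 : Nat) : Int) by omega,
      show (R : Int) + (j : Int) = ((R - 1 + (j + 1) : Nat) : Int) by omega,
      show (j : Int) + 1 = ((j + 1 : Nat) : Int) by push_cast; ring]
  rw [PySem.List.slice_to_natCast, PySem.List.slice_natCast, PySem.List.slice_natCast,
      PySem.List.pyGetD_natCast, PySem.List.pyGetD_natCast]
  rw [show R + j + 1 - R = j + 1 by omega, show R - 1 + (j + 1) - (R - 1) = j + 1 by omega]
  have hlen1 : ((fact.drop R).take (j + 1)).length = j + 1 := by simp; omega
  have hlen0 : ((fact.drop (R - 1)).take (j + 1)).length = j + 1 := by simp; omega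
  have hlenf : (factinv.take (j + 1)).length = j + 1 := by simp; omega
  rw [pv_zip_map_sum _ _ (j + 1) hlen1 hlenf (fun a b => a * b),
      pv_enum_zip_map_sum _ _ (j + 1) hlen0 hlenf (fun a b c => ((j : Int) - a) * b * c)]
  -- reflect A's sum (f := j - i) and conclude by a termwise mod-MOD congruence
  rw [← Finset.sum_range_reflect (fun f => pvTerm N fact factinv (f : Int) ((N : Int) - 1 - (j : Int))) (j + 1)]
  rw [Finset.mul_sum, Finset.mul_sum, ← Finset.sum_add_distrib]
  rw [PySem.Int.mod_eq_emod_of_pos hM, PySem.Int.mod_eq_emod_of_pos hM]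
  refine (Int.ModEq.sum (fun i hi => ?_)).symm
  rw [Finset.mem_range] at hi
  have hij : i ≤ j := by omega
  -- replace slice lookups by direct lookups
  rw [pv_getD_drop_take fact R (j + 1) i hi (by omega),
      pv_getD_drop_take fact (R - 1) (j + 1) i hi (by omega),
      show (factinv.take (j + 1)).getD i 0 = factinv.getD i 0 from by
        simpa using pv_getD_drop_take factinv 0 (j + 1) i hi (by omega)]
  -- unfold A's term at f = j - i with all indices written as Nat casts
  unfold pvTerm pvBinomA
  have e1 : (N : Int) - ((j + 1 - 1 - i : Nat) : Int) + ((N : Int) - 1 - (j : Int)) = ((R + i : Nat) : Int) := by omega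
  have e2 : (2 : Int) * ((N : Int) - 1 - (j : Int)) + 1 = ((R : Nat) : Int) := by omega
  have e3 : ((R + i : Nat) : Int) - 1 = ((R - 1 + i : Nat) : Int) := by omega
  have e4 : (2 : Int) * ((N : Int) - 1 - (j : Int)) = ((R - 1 : Nat) : Int) := by omega
  have e5 : ((R + i : Nat) : Int) - ((R : Nat) : Int) = ((i : Nat) : Int) := by push_cast; ring
  have e6 : ((R - 1 + i : Nat) : Int) - ((R - 1 : Nat) : Int) = ((i : Nat) : Int) := by omega
  have hfj : ((j + 1 - 1 - i : Nat) : Int) = (j : Int) - (i : Int) := by omega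
  rw [e1, e2, e3, e4, e5, e6, hfj]
  simp only [PySem.List.pyGetD_natCast]
  refine Int.ModEq.add (pv_binom_modeq _ _ _) ?_
  have h0 := (pv_binom_modeq (fact.getD (R - 1 + i) 0) (factinv.getD (R - 1) 0) (factinv.getD i 0)).mul_left ((j : Int) - (i : Int))
  calc ((j : Int) - (i : Int)) * (PySem.Int.mod (PySem.Int.mod (fact.getD (R - 1 + i) 0 * factinv.getD (R - 1) 0) pvMOD * factinv.getD i 0) pvMOD)
      ≡ ((j : Int) - (i : Int)) * (factinv.getD (R - 1) 0 * (fact.getD (R - 1 + i) 0 * factinv.getD i 0)) [ZMOD pvMOD] := h0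
    _ = factinv.getD (R - 1) 0 * (((j : Int) - (i : Int)) * fact.getD (R - 1 + i) 0 * factinv.getD i 0) := by ring

theorem pv_B_eq_state (N : Nat) (fact factinv : List Int)
    (hf : 2 * N ≤ fact.length) (hfi : 2 * N ≤ factinv.length) :
    solvering2_alt (N : Int) fact factinv = pvState N fact factinv N := by
  unfold solvering2_alt pvState pvLast
  rw [PySem.List.pyRange_zero_natCast, List.map_map]
  refine congrArg (fun l => l ++ [if (N : Int) == 1 then (1:Int) else 2]) ?_
  apply List.map_congr_left
  intro j hj
  simp only [List.mem_range] at hj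
  simp only [Function.comp]
  rw [pv_B_cell N j fact factinv hj hf hfi, pv_pc_closed N fact factinv j hj]

-- ===== VERDICT (by name: the statement is the Claim_ definition above) =====
theorem solvering2_spec : Claim_equal_solvering2 := by
  intro cnt fact factinv _ hpre
  unfold Spec_solvering2
  obtain ⟨h0, hf, hfi⟩ := hpre
  obtain ⟨N, rfl⟩ : ∃ N : Nat, cnt = (N : Int) := ⟨cnt.toNat, (Int.toNat_of_nonneg h0).symm⟩
  rw [pv_A_eq_state, pv_B_eq_state N fact factinv (by omega) (by omega)]
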